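-- pv_equiv track=rewrite | github.com/webclinic017/fa-absa-py3 | Python modules/CFR_Recon.py | removeVoidedAndReversedTrades
-- ===== SOURCE A (Python) =====
-- def removeVoidedAndReversedTrades(frontArenaTradeDictionary, midasReversedTrades):
--     voidedMidasTrades = []
--     for midasLine in midasReversedTrades:
--         #print str(midasLine[5].replace('-','')), str(midasLine[2]), str(midasLine[3])
--         #if '%s_%s_%s' %(str(midasLine[5].replace('-','')), str(midasLine[2]), str(midasLine[3])) == '20160810_134542_0':
--         #    print '@@' * 200
--         voidedMidasTrades.append('%s_%s_%s' %(str(midasLine[4].replace('-', '')), str(midasLine[2]), str(midasLine[3])))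
--
--     #print frontArenaTradeDictionary.keys()
--     #print voidedMidasTrades
--     for trade in voidedMidasTrades:
--         if trade in frontArenaTradeDictionary.keys():
--             del frontArenaTradeDictionary[trade]
--
--     return frontArenaTradeDictionary
-- ===== SOURCE B (Python) =====
-- def removeVoidedAndReversedTrades(frontArenaTradeDictionary, midasReversedTrades):
--     voided = set('%s_%s_%s' % (midasLine[4].replace('-', ''),
--                                midasLine[2], midasLine[3])
--                  for midasLine in midasReversedTrades)
--     kept = {key: value for key, value in frontArenaTradeDictionary.items()
--             if key not in voided}
--     frontArenaTradeDictionary.clear()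
--     frontArenaTradeDictionary.update(kept)
--     return frontArenaTradeDictionary
-- ===== Notes on version B (the rewrite author's own statement) =====
-- stated objective: alternative
-- what changed: Instead of A's delete-driven two passes (materialize a list of voided keys, then scan it deleting matching dict entries), B builds a set of voided keys once and reconstructs the dictionary by a single filtering comprehension over the dict's own entries, keeping exactly those whose key is not in the set; the surviving entries' insertion order is unchanged either way.
import Mathlib
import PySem

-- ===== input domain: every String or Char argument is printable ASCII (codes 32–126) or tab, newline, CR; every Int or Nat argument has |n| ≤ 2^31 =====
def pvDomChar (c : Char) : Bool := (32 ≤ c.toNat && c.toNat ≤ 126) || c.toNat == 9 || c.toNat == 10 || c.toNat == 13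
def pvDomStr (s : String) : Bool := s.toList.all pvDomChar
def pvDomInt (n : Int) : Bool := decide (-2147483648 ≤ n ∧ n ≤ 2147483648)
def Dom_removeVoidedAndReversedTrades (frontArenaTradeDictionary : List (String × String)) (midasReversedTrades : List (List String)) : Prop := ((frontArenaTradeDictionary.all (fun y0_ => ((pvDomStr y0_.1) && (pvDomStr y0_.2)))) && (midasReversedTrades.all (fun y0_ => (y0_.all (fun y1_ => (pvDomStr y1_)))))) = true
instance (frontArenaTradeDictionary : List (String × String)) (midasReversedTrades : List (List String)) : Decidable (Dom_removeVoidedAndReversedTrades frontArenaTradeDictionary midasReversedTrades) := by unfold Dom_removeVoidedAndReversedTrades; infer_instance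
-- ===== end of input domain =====

-- B replaces A's delete-driven passes (list the voided keys, then delete each from the dict) by
-- building a SET of voided keys and reconstructing the dict by filtering its own entries against it.
-- Both Pythons mutate the dict argument in place; the theorems here are about the returned value.

-- ===== PORT A =====
-- the key '%s_%s_%s' % (str(line[4].replace('-','')), str(line[2]), str(line[3]));
-- pyGetD with default "" is exact under Pre_ (every line has at least 5 fields)
def pvKey (midasLine : List String) : String :=
  PySem.Str.replace (PySem.List.pyGetD midasLine 4 "") "-" "" ++ "_" ++
    PySem.List.pyGetD midasLine 2 "" ++ "_" ++ PySem.List.pyGetD midasLine 3 ""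

def removeVoidedAndReversedTrades (frontArenaTradeDictionary : List (String × String)) (midasReversedTrades : List (List String)) : List (String × String) :=
  -- first loop: voidedMidasTrades.append(key(midasLine))
  let voidedMidasTrades : List String :=
    midasReversedTrades.foldl (fun acc midasLine => acc ++ [pvKey midasLine]) []
  -- second loop: if trade in dict.keys(): del dict[trade]
  (voidedMidasTrades.foldl
      (fun d trade => if (PySem.Dict.keys d).contains trade then PySem.Dict.erase d trade else d)
      (PySem.Dict.mk frontArenaTradeDictionary)).items

-- ===== PORT B =====  (the key expression is the same in both Pythons: shared helper pvKey)

def removeVoidedAndReversedTrades_alt (frontArenaTradeDictionary : List (String × String)) (midasReversedTrades : List (List String)) : List (String × String) :=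
  -- voided = set(key(line) for line in midasReversedTrades)
  let voided : PySem.Set String := PySem.Set.ofList (midasReversedTrades.map pvKey)
  -- kept = {k: v for k, v in dict.items() if k not in voided}  (a dict built entry by entry)
  let kept : PySem.Dict String String :=
    (PySem.Dict.mk frontArenaTradeDictionary).items.foldl
      (fun kept p => if PySem.Set.contains voided p.1 then kept else PySem.Dict.insert kept p.1 p.2)
      PySem.Dict.empty
  -- dict.clear(); dict.update(kept); return dict  — the returned value is kept's contents
  kept.items

-- ===== PRECONDITION & SPEC =====
-- Pre_ excludes (1) inputs on which the Python A raises IndexError (a midasLine with fewer than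
-- 5 fields) and (2) association lists with duplicate keys, which do not represent any Python dict
-- (the frontArenaTradeDictionary argument is a dict, whose keys are necessarily distinct).
def Pre_removeVoidedAndReversedTrades (frontArenaTradeDictionary : List (String × String)) (midasReversedTrades : List (List String)) : Prop :=
  (∀ midasLine ∈ midasReversedTrades, 5 ≤ midasLine.length) ∧
    (frontArenaTradeDictionary.map (·.1)).Nodup
instance (frontArenaTradeDictionary : List (String × String)) (midasReversedTrades : List (List String)) : Decidable (Pre_removeVoidedAndReversedTrades frontArenaTradeDictionary midasReversedTrades) := by unfold Pre_removeVoidedAndReversedTrades; infer_instance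

def pvWitness_removeVoidedAndReversedTrades : (List (String × String)) × List (List String) :=
  ([("20160810_134542_0", "x"), ("k", "y")], [["a", "b", "134542", "0", "2016-08-10"]])

def Spec_removeVoidedAndReversedTrades (frontArenaTradeDictionary : List (String × String)) (midasReversedTrades : List (List String)) (out : List (String × String)) : Prop := out = removeVoidedAndReversedTrades_alt frontArenaTradeDictionary midasReversedTrades
instance (frontArenaTradeDictionary : List (String × String)) (midasReversedTrades : List (List String)) (out : List (String × String)) : Decidable (Spec_removeVoidedAndReversedTrades frontArenaTradeDictionary midasReversedTrades out) := by unfold Spec_removeVoidedAndReversedTrades; infer_instance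

-- ===== CLAIM (what is proved, stated in full; the proofs are below) =====
def Claim_equal_removeVoidedAndReversedTrades : Prop := ∀ (frontArenaTradeDictionary : List (String × String)) (midasReversedTrades : List (List String)), Dom_removeVoidedAndReversedTrades frontArenaTradeDictionary midasReversedTrades → Pre_removeVoidedAndReversedTrades frontArenaTradeDictionary midasReversedTrades → Spec_removeVoidedAndReversedTrades frontArenaTradeDictionary midasReversedTrades (removeVoidedAndReversedTrades frontArenaTradeDictionary midasReversedTrades)

-- ===== LEMMAS AND PROOFS =====

-- A's first loop materialises exactly the map of the key function
theorem foldl_append_key (l : List (List String)) (acc : List String) :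
    l.foldl (fun acc midasLine => acc ++ [pvKey midasLine]) acc = acc ++ l.map pvKey := by
  induction l generalizing acc with
  | nil => simp
  | cons x xs ih => simp [List.foldl_cons, ih]

-- the guarded delete of A's second loop is an unconditional erase (erase is a no-op on a missing key)
theorem guarded_erase_eq (d : PySem.Dict String String) (t : String) :
    (if (PySem.Dict.keys d).contains t then PySem.Dict.erase d t else d) = PySem.Dict.erase d t := by
  by_cases h : (PySem.Dict.keys d).contains t = true
  · rw [if_pos h]
  · rw [if_neg h]
    apply PySem.Dict.ext
    show d.items = d.items.filter (fun p => !(p.1 == t))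
    refine (List.filter_eq_self.mpr ?_).symm
    intro p hp
    cases hbe : p.1 == t with
    | false => simp
    | true =>
      exfalso
      apply h
      have hmem : t ∈ PySem.Dict.keys d := by
        have hpt : p.1 = t := eq_of_beq hbe
        exact hpt ▸ List.mem_map_of_mem hp
      simpa using hmem

-- A's erase loop filters the items: an entry survives iff its key is not among the erased ones
theorem foldl_erase_items (ks : List String) (d : PySem.Dict String String) :
    (ks.foldl (fun d t => PySem.Dict.erase d t) d).items
      = d.items.filter (fun p => !(ks.contains p.1)) := by
  induction ks generalizing d with
  | nil => simp
  | cons k ks ih =>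
    rw [List.foldl_cons, ih]
    have herase : (PySem.Dict.erase d k).items = d.items.filter (fun p => !(p.1 == k)) := rfl
    rw [herase, List.filter_filter]
    apply List.filter_congr
    intro p _
    simp only [List.contains_cons, Bool.not_or, Bool.and_comm]

-- B's comprehension loop over pairwise-distinct-key entries, none present in the accumulator,
-- appends exactly the kept (filtered) entries
theorem foldl_filter_insert (c : String → Bool) (l : List (String × String))
    (acc : PySem.Dict String String)
    (hnd : (l.map (·.1)).Nodup) (hfresh : ∀ p ∈ l, acc.contains p.1 = false) :
    (l.foldl (fun kept p => if c p.1 then kept else PySem.Dict.insert kept p.1 p.2) acc).items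
      = acc.items ++ l.filter (fun p => !(c p.1)) := by
  induction l generalizing acc with
  | nil => simp
  | cons p ps ih =>
    rw [List.map_cons, List.nodup_cons] at hnd
    rw [List.foldl_cons]
    by_cases hc : c p.1 = true
    · rw [if_pos hc, ih _ hnd.2 (fun q hq => hfresh q (List.mem_cons_of_mem p hq)),
        List.filter_cons]
      simp [hc]
    · rw [if_neg hc]
      have hne := hfresh p (List.mem_cons_self)
      have hstep :
          (ps.foldl (fun kept q => if c q.1 then kept else PySem.Dict.insert kept q.1 q.2)
              (PySem.Dict.insert acc p.1 p.2)).items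
            = (PySem.Dict.insert acc p.1 p.2).items ++ ps.filter (fun q => !(c q.1)) := by
        refine ih _ hnd.2 ?_
        intro q hq
        rw [PySem.Dict.contains_insert]
        have hq1 : q.1 ≠ p.1 := by
          intro he
          exact hnd.1 (he ▸ List.mem_map_of_mem hq)
        simp [hq1, hfresh q (List.mem_cons_of_mem p hq)]
      rw [hstep, PySem.Dict.items_insert_of_not_contains acc p.2 hne, List.filter_cons]
      simp [hc]

-- ===== VERDICT (by name: the statement is the Claim_ definition above) =====
theorem removeVoidedAndReversedTrades_spec : Claim_equal_removeVoidedAndReversedTrades := by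
  intro fad mrt _ hpre
  show removeVoidedAndReversedTrades fad mrt = removeVoidedAndReversedTrades_alt fad mrt
  show ((mrt.foldl (fun acc midasLine => acc ++ [pvKey midasLine]) []).foldl
        (fun d trade =>
          if (PySem.Dict.keys d).contains trade then PySem.Dict.erase d trade else d)
        (PySem.Dict.mk fad)).items
      = ((PySem.Dict.mk fad).items.foldl
          (fun kept p =>
            if PySem.Set.contains (PySem.Set.ofList (mrt.map pvKey)) p.1 then kept
            else PySem.Dict.insert kept p.1 p.2)
          PySem.Dict.empty).items
  rw [foldl_append_key, List.nil_append]
  have hguard : (fun (d : PySem.Dict String String) trade =>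
        if (PySem.Dict.keys d).contains trade then PySem.Dict.erase d trade else d)
      = fun d t => PySem.Dict.erase d t :=
    funext fun d => funext fun t => guarded_erase_eq d t
  rw [hguard, foldl_erase_items]
  have hitems : (PySem.Dict.mk fad).items = fad := rfl
  have hB := foldl_filter_insert
      (fun k => PySem.Set.contains (PySem.Set.ofList (mrt.map pvKey)) k)
      (PySem.Dict.mk fad).items PySem.Dict.empty
      (by rw [hitems]; exact hpre.2)
      (by intro q _; simp [PySem.Dict.contains_empty])
  rw [hB, show (PySem.Dict.empty : PySem.Dict String String).items = [] from rfl,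
    List.nil_append]
  apply List.filter_congr
  intro p _
  have hc : (PySem.Set.ofList (mrt.map pvKey)).contains p.1 = (mrt.map pvKey).contains p.1 := by
    by_cases hm : p.1 ∈ mrt.map pvKey
    · rw [(PySem.Set.contains_iff _ _).mpr ((PySem.Set.mem_ofList _ _).mpr hm),
        List.contains_iff_mem.mpr hm]
    · have h1 : (PySem.Set.ofList (mrt.map pvKey)).contains p.1 = false := by
        rw [Bool.eq_false_iff]
        intro h
        exact hm ((PySem.Set.mem_ofList _ _).mp ((PySem.Set.contains_iff _ _).mp h))
      have h2 : (mrt.map pvKey).contains p.1 = false := by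
        rw [Bool.eq_false_iff]
        intro h
        exact hm (List.contains_iff_mem.mp h)
      rw [h1, h2]
  show (!(mrt.map pvKey).contains p.1)
      = !(PySem.Set.ofList (mrt.map pvKey)).contains p.1
  rw [hc]
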